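-- pv_equiv track=rewrite | github.com/xiarongwen/aegis-os | tools/control_plane/cli.py | optimize_skill_content
-- ===== SOURCE A (Python) =====
-- from typing import Any
--
-- def optimize_skill_content(agent: dict[str, Any], content: str) -> str:
--     if "## Runtime Contracts" not in content:
--         block = "\n## Runtime Contracts\n\nThis agent relies on the following abstract actions:\n" + "\n".join(f"- `{action}`" for action in agent.get("contract_actions", [])) + "\n"
--         marker = "\n## Inputs"
--         if marker in content:
--             content = content.replace(marker, block + marker, 1)
--     replacements = {
--         "WebSearch": "`search_web`",
--         "AskUserQuestion": "`ask_user`",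
--         "mcp__fetch__fetch": "`fetch_source`",
--         "superpowers:writing-plans": "`write_plan`",
--         "superpowers:test-driven-development": "`run_test_driven_cycle`",
--         "superpowers:verification-before-completion": "`run_verification`",
--         "Agent({": "`spawn_agent` contract payload"
--     }
--     for source, target in replacements.items():
--         content = content.replace(source, target)
--     return content
-- ===== SOURCE B (Python) =====
-- def optimize_skill_content(agent: dict, content: str) -> str:
--     if "## Runtime Contracts" not in content:
--         block = "\n## Runtime Contracts\n\nThis agent relies on the following abstract actions:\n" + "\n".join(f"- `{action}`" for action in agent.get("contract_actions", [])) + "\n"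
--         idx = content.find("\n## Inputs")
--         if idx != -1:
--             content = content[:idx] + block + content[idx:]
--     pairs = [
--         ("WebSearch", "`search_web`"),
--         ("AskUserQuestion", "`ask_user`"),
--         ("mcp__fetch__fetch", "`fetch_source`"),
--         ("superpowers:writing-plans", "`write_plan`"),
--         ("superpowers:test-driven-development", "`run_test_driven_cycle`"),
--         ("superpowers:verification-before-completion", "`run_verification`"),
--         ("Agent({", "`spawn_agent` contract payload"),
--     ]
--     out = []
--     i = 0
--     n = len(content)
--     while i < n:
--         for src, tgt in pairs:
--             if content.startswith(src, i):
--                 out.append(tgt)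
--                 i += len(src)
--                 break
--         else:
--             out.append(content[i])
--             i += 1
--     return "".join(out)
-- ===== Notes on version B (the rewrite author's own statement) =====
-- stated objective: alternative
-- what changed: A runs seven sequential full str.replace passes (and a count-1 replace for the contract block); B makes a single left-to-right scan that matches all seven sources at once (first matching pair wins) and inserts the contract block by find+slice splice instead of replace(...,1).
import Mathlib
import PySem

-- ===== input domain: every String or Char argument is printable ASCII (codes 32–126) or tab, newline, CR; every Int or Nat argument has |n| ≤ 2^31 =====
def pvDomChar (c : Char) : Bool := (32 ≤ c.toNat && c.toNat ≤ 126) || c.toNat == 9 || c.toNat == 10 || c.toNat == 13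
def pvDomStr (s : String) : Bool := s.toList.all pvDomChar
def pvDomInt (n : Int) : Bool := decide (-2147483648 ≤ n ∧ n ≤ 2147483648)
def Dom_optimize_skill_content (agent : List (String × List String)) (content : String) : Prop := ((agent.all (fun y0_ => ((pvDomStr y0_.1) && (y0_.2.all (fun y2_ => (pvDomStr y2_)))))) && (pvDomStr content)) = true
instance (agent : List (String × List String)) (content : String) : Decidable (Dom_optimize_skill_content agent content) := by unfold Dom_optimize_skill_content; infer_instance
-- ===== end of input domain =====

-- B replaces A's seven sequential str.replace passes by ONE left-to-right multi-pattern scan (and the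
-- count-1 replace by find+splice); same return value, different algorithm (objective: alternative).

-- ===== PORT A =====
-- hand port of content.replace(old, new, 1) (count-limited replace, no PySem primitive);
-- exact for nonempty old — the only call site passes old = "\n## Inputs"
def pvReplace1L (old new : List Char) : List Char → List Char
  | [] => []
  | c :: t =>
    if old.isPrefixOf (c :: t) then new ++ List.drop (old.length - 1) t
    else c :: pvReplace1L old new t

def pvBlockA (agent : List (String × List String)) : String :=
  "\n## Runtime Contracts\n\nThis agent relies on the following abstract actions:\n"
    ++ PySem.Str.join "\n" (((PySem.Dict.mk agent).getD "contract_actions" []).map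
        (fun action => "- `" ++ action ++ "`"))
    ++ "\n"

def pvPhase1A (agent : List (String × List String)) (content : String) : String :=
  if !(PySem.Str.isIn "## Runtime Contracts" content) then
    if PySem.Str.isIn "\n## Inputs" content then
      String.ofList (pvReplace1L "\n## Inputs".toList (pvBlockA agent ++ "\n## Inputs").toList content.toList)
    else content
  else content

def pvReplacementsA : PySem.Dict String String := PySem.Dict.mk
  [("WebSearch", "`search_web`"),
   ("AskUserQuestion", "`ask_user`"),
   ("mcp__fetch__fetch", "`fetch_source`"),
   ("superpowers:writing-plans", "`write_plan`"),
   ("superpowers:test-driven-development", "`run_test_driven_cycle`"),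
   ("superpowers:verification-before-completion", "`run_verification`"),
   ("Agent({", "`spawn_agent` contract payload")]

def optimize_skill_content (agent : List (String × List String)) (content : String) : String :=
  pvReplacementsA.items.foldl (fun c p => PySem.Str.replace c p.1 p.2) (pvPhase1A agent content)

-- ===== PORT B =====
def pvPairsB : List (String × String) :=
  [("WebSearch", "`search_web`"),
   ("AskUserQuestion", "`ask_user`"),
   ("mcp__fetch__fetch", "`fetch_source`"),
   ("superpowers:writing-plans", "`write_plan`"),
   ("superpowers:test-driven-development", "`run_test_driven_cycle`"),
   ("superpowers:verification-before-completion", "`run_verification`"),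
   ("Agent({", "`spawn_agent` contract payload")]

-- Source B's single left-to-right scan: at each position the first pair whose source matches is emitted
def pvMultiL (L : List (List Char × List Char)) : List Char → List Char
  | [] => []
  | c :: t =>
    match L.find? (fun p => p.1.isPrefixOf (c :: t)) with
    | some p => p.2 ++ pvMultiL L (List.drop (p.1.length - 1) t)
    | none => c :: pvMultiL L t
  termination_by s => s.length
  decreasing_by all_goals simp

def pvBlockB (agent : List (String × List String)) : String :=
  "\n## Runtime Contracts\n\nThis agent relies on the following abstract actions:\n"
    ++ PySem.Str.join "\n" (((PySem.Dict.mk agent).getD "contract_actions" []).map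
        (fun action => "- `" ++ action ++ "`"))
    ++ "\n"

-- content[:idx] + block + content[idx:] ported with take/drop: exact since idx = content.find(...) ≥ 0 under the guard
def pvPhase1B (agent : List (String × List String)) (content : String) : String :=
  if !(PySem.Str.isIn "## Runtime Contracts" content) then
    let idx := PySem.Str.find content "\n## Inputs"
    if idx == -1 then content
    else String.ofList (content.toList.take idx.toNat ++ (pvBlockB agent).toList ++ content.toList.drop idx.toNat)
  else content

def optimize_skill_content_alt (agent : List (String × List String)) (content : String) : String :=
  String.ofList (pvMultiL (pvPairsB.map (fun p => (p.1.toList, p.2.toList))) (pvPhase1B agent content).toList)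

-- ===== PRECONDITION & SPEC =====
def Spec_optimize_skill_content (agent : List (String × List String)) (content : String) (out : String) : Prop := out = optimize_skill_content_alt agent content
instance (agent : List (String × List String)) (content : String) (out : String) : Decidable (Spec_optimize_skill_content agent content out) := by unfold Spec_optimize_skill_content; infer_instance

-- ===== CLAIM (what is proved, stated in full; the proofs are below) =====
def Claim_equal_optimize_skill_content : Prop := ∀ (agent : List (String × List String)) (content : String), Dom_optimize_skill_content agent content → Spec_optimize_skill_content agent content (optimize_skill_content agent content)

-- ===== LEMMAS AND PROOFS =====

-- two lists are "compatible" if one is a prefix of the other (= they can overlap at a junction)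
abbrev pvCompat (a b : List Char) : Prop := a <+: b ∨ b <+: a

theorem pvPrefixAppendCases {a b x : List Char} (h : a <+: b ++ x) : a <+: b ∨ b <+: a := by
  by_cases hl : a.length ≤ b.length
  · exact Or.inl (List.prefix_of_prefix_length_le h (List.prefix_append b x) hl)
  · exact Or.inr (List.prefix_of_prefix_length_le (List.prefix_append b x) h (by omega))

-- structural form of Python str.replace (all occurrences, nonempty old)
def pvRepA (old new : List Char) : List Char → List Char
  | [] => []
  | c :: t =>
    if old.isPrefixOf (c :: t) then new ++ pvRepA old new (List.drop (old.length - 1) t)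
    else c :: pvRepA old new t
  termination_by s => s.length
  decreasing_by all_goals simp

theorem pvRepA_nil (old new : List Char) : pvRepA old new [] = [] := by rw [pvRepA]

theorem pvRepA_cons (old new : List Char) (c : Char) (t : List Char) :
    pvRepA old new (c :: t) =
      if old.isPrefixOf (c :: t) then new ++ pvRepA old new (List.drop (old.length - 1) t)
      else c :: pvRepA old new t := by rw [pvRepA]

theorem pvRepA_cons_neg (old new : List Char) (c : Char) (t : List Char)
    (h : ¬ old <+: (c :: t)) : pvRepA old new (c :: t) = c :: pvRepA old new t := by
  rw [pvRepA_cons, if_neg (by simpa [List.isPrefixOf_iff_prefix] using h)]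

theorem pvRepA_prefix (old new s : List Char) (hne : old ≠ []) (h : old <+: s) :
    pvRepA old new s = new ++ pvRepA old new (s.drop old.length) := by
  cases s with
  | nil => exact absurd (List.prefix_nil.mp h) hne
  | cons c t =>
    rw [pvRepA_cons, if_pos (List.isPrefixOf_iff_prefix.mpr h)]
    cases old with
    | nil => exact absurd rfl hne
    | cons o os => simp

theorem pvGoSpec (old new : List Char) (hne : old ≠ []) :
    ∀ (fuel : Nat) (s acc : List Char), s.length ≤ fuel →
      PySem.Chars.replace.go old new fuel s acc = acc.reverse ++ pvRepA old new s := by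
  intro fuel
  induction fuel with
  | zero =>
    intro s acc hs
    have : s = [] := List.eq_nil_of_length_eq_zero (by omega)
    subst this
    simp [PySem.Chars.replace.go, pvRepA_nil]
  | succ n ih =>
    intro s acc hs
    cases s with
    | nil => simp [PySem.Chars.replace.go, pvRepA_nil]
    | cons c t =>
      rw [PySem.Chars.replace.go]
      by_cases h : old.isPrefixOf (c :: t)
      · rw [if_pos h, pvRepA_cons, if_pos h]
        cases old with
        | nil => exact absurd rfl hne
        | cons o os =>
          have hlen : (List.drop (o :: os).length (c :: t)).length ≤ n := by
            simp at hs ⊢; omega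
          rw [ih _ _ hlen]
          simp
      · rw [if_neg h, pvRepA_cons, if_neg h]
        have hlen : t.length ≤ n := by simp at hs; omega
        rw [ih _ _ hlen]
        simp

theorem pvReplaceEq (s old new : List Char) (hne : old ≠ []) :
    PySem.Chars.replace s old new = pvRepA old new s := by
  rw [PySem.Chars.replace, if_neg (by simpa [List.isEmpty_iff] using hne)]
  simpa using pvGoSpec old new hne s.length s [] le_rfl

-- A's replacement loop, on lists
def pvChain (L : List (List Char × List Char)) (s : List Char) : List Char :=
  L.foldl (fun s p => pvRepA p.1 p.2 s) s

theorem pvChain_nil : ∀ (L : List (List Char × List Char)), pvChain L [] = [] := by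
  intro L
  induction L with
  | nil => rfl
  | cons p L ih => simpa [pvChain, pvRepA_nil] using ih

theorem pvFoldStr : ∀ (items : List (String × String)) (s : String),
    (∀ p ∈ items, p.1 ≠ "") →
    (items.foldl (fun c p => PySem.Str.replace c p.1 p.2) s).toList =
      pvChain (items.map (fun p => (p.1.toList, p.2.toList))) s.toList := by
  intro items
  induction items with
  | nil => intro s _; rfl
  | cons p rest ih =>
    intro s h
    have hne : p.1.toList ≠ [] := by
      intro hnil
      exact h p (List.mem_cons_self ..) (String.toList_inj.mp (by simpa using hnil))
    have := ih (PySem.Str.replace s p.1 p.2) (fun q hq => h q (List.mem_cons_of_mem _ hq))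
    simpa [pvChain, List.foldl_cons, PySem.Str.toList_replace,
      pvReplaceEq _ _ _ hne] using this

-- splice: replace passes an occurrence-free left part through unchanged
theorem pvRepA_append (src tgt : List Char) :
    ∀ (a x : List Char), (∀ k < a.length, ¬ pvCompat src (a.drop k)) →
      pvRepA src tgt (a ++ x) = a ++ pvRepA src tgt x := by
  intro a
  induction a with
  | nil => intro x _; simp
  | cons c a' ih =>
    intro x h
    have hnp : ¬ src <+: (c :: (a' ++ x)) := by
      intro hp
      exact h 0 (by simp) (by simpa using pvPrefixAppendCases (b := c :: a') hp)
    rw [List.cons_append, pvRepA_cons_neg _ _ _ _ hnp,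
      ih x (fun k hk => by simpa using h (k + 1) (by simpa using hk))]
    rfl

theorem pvChain_append_left : ∀ (L : List (List Char × List Char)) (a y : List Char),
    (∀ p ∈ L, ∀ k < a.length, ¬ pvCompat p.1 (a.drop k)) →
    pvChain L (a ++ y) = a ++ pvChain L y := by
  intro L
  induction L with
  | nil => intro a y _; rfl
  | cons p L' ih =>
    intro a y h
    have h1 := pvRepA_append p.1 p.2 a y (h p (List.mem_cons_self ..))
    calc pvChain (p :: L') (a ++ y) = pvChain L' (pvRepA p.1 p.2 (a ++ y)) := rfl
      _ = pvChain L' (a ++ pvRepA p.1 p.2 y) := by rw [h1]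
      _ = a ++ pvChain L' (pvRepA p.1 p.2 y) :=
          ih _ _ (fun q hq => h q (List.mem_cons_of_mem _ hq))
      _ = a ++ pvChain (p :: L') y := rfl

-- an occurrence of srcB at the front of u ++ (replace-output) was already there before the replace
theorem pvP (srcA tgtA srcB : List Char) (hneA : srcA ≠ [])
    (hB : ∀ k < srcB.length, ¬ pvCompat (srcB.drop k) tgtA) :
    ∀ (t u : List Char), srcB <+: u ++ pvRepA srcA tgtA t → srcB <+: u ++ t := by
  intro t
  induction t with
  | nil => intro u h; simpa [pvRepA_nil] using h
  | cons c t' ih =>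
    intro u h
    by_cases hp : srcA <+: (c :: t')
    · rw [pvRepA_prefix _ _ _ hneA hp] at h
      rcases pvPrefixAppendCases h with h1 | h1
      · exact h1.trans (List.prefix_append u _)
      · obtain ⟨v, hv⟩ := h1
        by_cases hv0 : v = []
        · subst hv0
          rw [← hv]
          simp
        · exfalso
          have hvp : v <+: tgtA ++ pvRepA srcA tgtA (List.drop srcA.length (c :: t')) := by
            have := h
            rw [← hv] at this
            exact (List.prefix_append_right_inj u).mp this
          have hcomp : pvCompat v tgtA := by
            rcases pvPrefixAppendCases hvp with h2 | h2
            · exact Or.inl h2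
            · exact Or.inr h2
          have hdrop : srcB.drop u.length = v := by rw [← hv]; simp
          have hvpos : 0 < v.length := by
            cases v with
            | nil => exact absurd rfl hv0
            | cons _ _ => simp
          have hlt : u.length < srcB.length := by
            rw [← hv]; simp; omega
          exact hB u.length hlt (by rwa [hdrop])
    · rw [pvRepA_cons_neg _ _ _ _ hp] at h
      have h' : srcB <+: (u ++ [c]) ++ pvRepA srcA tgtA t' := by simpa using h
      have := ih (u ++ [c]) h'
      simpa using this

theorem pvChain_cons : ∀ (L : List (List Char × List Char)) (c : Char) (t : List Char),
    (∀ p ∈ L, p.1 ≠ []) →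
    (∀ p ∈ L, ∀ q ∈ L, ∀ k < q.1.length, ¬ pvCompat (q.1.drop k) p.2) →
    (∀ p ∈ L, ¬ p.1 <+: (c :: t)) →
    pvChain L (c :: t) = c :: pvChain L t := by
  intro L
  induction L with
  | nil => intro c t _ _ _; rfl
  | cons p L' ih =>
    intro c t hne hSS hpre
    have hp : ¬ p.1 <+: (c :: t) := hpre p (List.mem_cons_self ..)
    have hstep : pvRepA p.1 p.2 (c :: t) = c :: pvRepA p.1 p.2 t := pvRepA_cons_neg _ _ _ _ hp
    have hpre' : ∀ q ∈ L', ¬ q.1 <+: (c :: pvRepA p.1 p.2 t) := by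
      intro q hq hcon
      have hnp : p.1 ≠ [] := hne p (List.mem_cons_self ..)
      have hSSpq := hSS p (List.mem_cons_self ..) q (List.mem_cons_of_mem _ hq)
      have : q.1 <+: [c] ++ t := by
        refine pvP p.1 p.2 q.1 hnp hSSpq t [c] ?_
        simpa using hcon
      exact hpre q (List.mem_cons_of_mem _ hq) (by simpa using this)
    calc pvChain (p :: L') (c :: t) = pvChain L' (pvRepA p.1 p.2 (c :: t)) := rfl
      _ = pvChain L' (c :: pvRepA p.1 p.2 t) := by rw [hstep]
      _ = c :: pvChain L' (pvRepA p.1 p.2 t) :=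
          ih c (pvRepA p.1 p.2 t)
            (fun q hq => hne q (List.mem_cons_of_mem _ hq))
            (fun q hq r hr => hSS q (List.mem_cons_of_mem _ hq) r (List.mem_cons_of_mem _ hr))
            hpre'
      _ = c :: pvChain (p :: L') t := rfl

theorem pvMultiL_nil (L : List (List Char × List Char)) : pvMultiL L [] = [] := by rw [pvMultiL]

theorem pvMultiL_cons (L : List (List Char × List Char)) (c : Char) (t : List Char) :
    pvMultiL L (c :: t) =
      match L.find? (fun p => p.1.isPrefixOf (c :: t)) with
      | some p => p.2 ++ pvMultiL L (List.drop (p.1.length - 1) t)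
      | none => c :: pvMultiL L t := by rw [pvMultiL]

-- MASTER: the sequential replacement chain equals the single left-to-right multi-pattern scan
theorem pvMaster (L : List (List Char × List Char))
    (hne : ∀ p ∈ L, p.1 ≠ [])
    (hTS : ∀ p ∈ L, ∀ q ∈ L, ∀ k < p.2.length, ¬ pvCompat q.1 (p.2.drop k))
    (hSS : ∀ p ∈ L, ∀ q ∈ L, ∀ k < q.1.length, ¬ pvCompat (q.1.drop k) p.2)
    (hOrd : List.Pairwise (fun p q => ∀ k < q.1.length, ¬ pvCompat p.1 (q.1.drop k)) L) :
    ∀ s : List Char, pvChain L s = pvMultiL L s := by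
  suffices H : ∀ (n : Nat) (s : List Char), s.length ≤ n → pvChain L s = pvMultiL L s by
    intro s; exact H s.length s le_rfl
  intro n
  induction n with
  | zero =>
    intro s hs
    have : s = [] := List.eq_nil_of_length_eq_zero (by omega)
    subst this
    rw [pvChain_nil, pvMultiL_nil]
  | succ n ih =>
    intro s hs
    cases s with
    | nil => rw [pvChain_nil, pvMultiL_nil]
    | cons c t =>
      rw [pvMultiL_cons]
      cases hf : L.find? (fun p => p.1.isPrefixOf (c :: t)) with
      | none =>
        have hnp : ∀ p ∈ L, ¬ p.1 <+: (c :: t) := by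
          intro p hp hcon
          have := List.find?_eq_none.mp hf p hp
          simp [List.isPrefixOf_iff_prefix] at this
          exact this hcon
        rw [pvChain_cons L c t hne hSS hnp, ih t (by simp at hs; omega)]
      | some p =>
        obtain ⟨hpp, L1, L2, hLdec, hL1⟩ := List.find?_eq_some_iff_append.mp hf
        have hmem : p ∈ L := List.mem_of_find?_eq_some hf
        have hnp : p.1 ≠ [] := hne p hmem
        obtain ⟨v, hv⟩ : p.1 <+: (c :: t) := List.isPrefixOf_iff_prefix.mp hpp
        -- t.drop (p.1.length - 1) = v
        have hdrop : List.drop (p.1.length - 1) t = v := by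
          cases hq : p.1 with
          | nil => exact absurd hq hnp
          | cons o os =>
            rw [hq] at hv
            have h1 : os ++ v = t := by
              have := hv
              simp [List.cons_append] at this
              exact this.2
            simp [← h1]
        have hvlen : v.length ≤ n := by
          have := congrArg List.length hv
          simp at this hs
          have h1 : 1 ≤ p.1.length := by
            cases hq : p.1 with
            | nil => exact absurd hq hnp
            | cons _ _ => simp
          omega
        -- decompose the chain
        have hOrd' := hOrd
        rw [hLdec] at hOrd'
        obtain ⟨-, -, hcross⟩ := List.pairwise_append.mp hOrd'
        have hA : pvChain L1 (p.1 ++ v) = p.1 ++ pvChain L1 v := by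
          refine pvChain_append_left L1 p.1 v ?_
          intro q hq k hk
          exact hcross q hq p (List.mem_cons_self ..) k hk
        have hB : pvRepA p.1 p.2 (p.1 ++ pvChain L1 v) =
            p.2 ++ pvRepA p.1 p.2 (pvChain L1 v) := by
          rw [pvRepA_prefix _ _ _ hnp (List.prefix_append _ _), List.drop_left]
        have hC : pvChain L2 (p.2 ++ pvRepA p.1 p.2 (pvChain L1 v)) =
            p.2 ++ pvChain L2 (pvRepA p.1 p.2 (pvChain L1 v)) := by
          refine pvChain_append_left L2 p.2 _ ?_
          intro q hq k hk
          refine hTS p hmem q ?_ k hk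
          rw [hLdec]
          exact List.mem_append_right _ (List.mem_cons_of_mem _ hq)
        have hchain : ∀ w : List Char, pvChain L w = pvChain L2 (pvRepA p.1 p.2 (pvChain L1 w)) := by
          intro w
          rw [hLdec]
          simp [pvChain, List.foldl_append]
        calc pvChain L (c :: t) = pvChain L (p.1 ++ v) := by rw [hv]
          _ = pvChain L2 (pvRepA p.1 p.2 (pvChain L1 (p.1 ++ v))) := hchain _
          _ = pvChain L2 (pvRepA p.1 p.2 (p.1 ++ pvChain L1 v)) := by rw [hA]
          _ = pvChain L2 (p.2 ++ pvRepA p.1 p.2 (pvChain L1 v)) := by rw [hB]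
          _ = p.2 ++ pvChain L2 (pvRepA p.1 p.2 (pvChain L1 v)) := hC
          _ = p.2 ++ pvChain L v := by rw [← hchain v]
          _ = p.2 ++ pvMultiL L (List.drop (p.1.length - 1) t) := by
              rw [hdrop, ih v hvlen]

-- the concrete pair list, on lists of characters
def pvLC : List (List Char × List Char) := pvPairsB.map (fun p => (p.1.toList, p.2.toList))

theorem pvFact_ne : ∀ p ∈ pvLC, p.1 ≠ [] := by decide
theorem pvFact_TS : ∀ p ∈ pvLC, ∀ q ∈ pvLC, ∀ k < p.2.length, ¬ pvCompat q.1 (p.2.drop k) := by decide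
theorem pvFact_SS : ∀ p ∈ pvLC, ∀ q ∈ pvLC, ∀ k < q.1.length, ¬ pvCompat (q.1.drop k) p.2 := by decide
theorem pvFact_Ord :
    List.Pairwise (fun p q => ∀ k < q.1.length, ¬ pvCompat p.1 (q.1.drop k)) pvLC := by decide

-- count-1 replace at the first occurrence = take/splice/drop at that index
theorem pvReplace1_spec (m y : List Char) (hm : m ≠ []) :
    ∀ (s : List Char) (j : Nat), m <+: s.drop j → (∀ i < j, ¬ m <+: s.drop i) →
      pvReplace1L m y s = s.take j ++ y ++ s.drop (j + m.length) := by
  intro s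
  induction s with
  | nil =>
    intro j h _
    simp at h
    exact absurd h hm
  | cons c t ih =>
    intro j h hmin
    cases j with
    | zero =>
      simp at h
      rw [pvReplace1L, if_pos (List.isPrefixOf_iff_prefix.mpr h)]
      cases m with
      | nil => exact absurd rfl hm
      | cons o os => simp
    | succ j =>
      have h0 : ¬ m <+: (c :: t) := by simpa using hmin 0 (by omega)
      rw [pvReplace1L, if_neg (by simpa [List.isPrefixOf_iff_prefix] using h0)]
      have := ih j (by simpa using h) (fun i hi => by simpa using hmin (i + 1) (by omega))
      simp [this, Nat.succ_add]

theorem pvPhase1_eq (agent : List (String × List String)) (content : String) :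
    pvPhase1A agent content = pvPhase1B agent content := by
  unfold pvPhase1A pvPhase1B
  cases hRT : PySem.Str.isIn "## Runtime Contracts" content with
  | true => simp
  | false =>
    simp only [Bool.not_false, if_pos]
    by_cases hin : PySem.Str.isIn "\n## Inputs" content = true
    · have hinf : ("\n## Inputs" : String).toList <:+: content.toList := by
        rw [PySem.Str.isIn_eq] at hin
        exact (PySem.Chars.isIn_iff_infix _ _).mp hin
      have hfind : 0 ≤ PySem.Str.find content "\n## Inputs" :=
        (PySem.Str.find_nonneg_iff _ _).mpr hinf
      have hne1 : (PySem.Str.find content "\n## Inputs" == -1) = false :=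
        beq_eq_false_iff_ne.mpr (by omega)
      rw [if_pos hin, hne1]
      simp only [Bool.false_eq_true, if_false]
      -- characterize the first occurrence
      have hfc : 0 ≤ PySem.Chars.find content.toList ("\n## Inputs" : String).toList := by
        rwa [PySem.Str.find_eq] at hfind
      obtain ⟨hocc, hmin⟩ := PySem.Chars.find_spec hfc
      have hmne : ("\n## Inputs" : String).toList ≠ [] := by decide
      have hR1 := pvReplace1_spec ("\n## Inputs" : String).toList
        (pvBlockA agent ++ "\n## Inputs").toList hmne content.toList
        (PySem.Chars.find content.toList ("\n## Inputs" : String).toList).toNat hocc hmin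
      rw [hR1]
      have hBlk : pvBlockB agent = pvBlockA agent := rfl
      have hj : (PySem.Str.find content "\n## Inputs").toNat =
          (PySem.Chars.find content.toList ("\n## Inputs" : String).toList).toNat := by
        rw [PySem.Str.find_eq]
      obtain ⟨w, hw⟩ := hocc
      have hdrop2 : List.drop
          ((PySem.Chars.find content.toList ("\n## Inputs" : String).toList).toNat +
            ("\n## Inputs" : String).toList.length) content.toList = w := by
        have h2 := congrArg (List.drop (("\n## Inputs" : String).toList.length)) hw
        rw [List.drop_left, List.drop_drop] at h2
        exact h2.symm
      rw [hj, hBlk, ← hw, hdrop2]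
      simp [String.toList_append]
    · have hnin : ¬ ("\n## Inputs" : String).toList <:+: content.toList := by
        intro hcon
        rw [PySem.Str.isIn_eq] at hin
        exact hin ((PySem.Chars.isIn_iff_infix _ _).mpr hcon)
      have hfind : PySem.Str.find content "\n## Inputs" = -1 :=
        (PySem.Str.find_eq_neg_one_iff _ _).mpr hnin
      rw [if_neg hin, hfind]
      simp

-- ===== VERDICT (by name: the statement is the Claim_ definition above) =====
theorem optimize_skill_content_spec : Claim_equal_optimize_skill_content := by
  unfold Claim_equal_optimize_skill_content
  intro agent content _
  unfold Spec_optimize_skill_content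
  unfold optimize_skill_content optimize_skill_content_alt
  rw [pvPhase1_eq]
  apply String.toList_inj.mp
  have hsrc : ∀ p ∈ [("WebSearch", "`search_web`"),
      ("AskUserQuestion", "`ask_user`"),
      ("mcp__fetch__fetch", "`fetch_source`"),
      ("superpowers:writing-plans", "`write_plan`"),
      ("superpowers:test-driven-development", "`run_test_driven_cycle`"),
      ("superpowers:verification-before-completion", "`run_verification`"),
      ("Agent({", "`spawn_agent` contract payload")], Prod.fst p ≠ "" := by decide
  have hfold := pvFoldStr pvReplacementsA.items (pvPhase1B agent content) hsrc
  rw [hfold]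
  have hmaster := pvMaster pvLC pvFact_ne pvFact_TS pvFact_SS pvFact_Ord
    (pvPhase1B agent content).toList
  have hLeq : pvReplacementsA.items.map (fun p => (p.1.toList, p.2.toList)) = pvLC := rfl
  rw [hLeq, hmaster]
  rw [String.toList_ofList]
  rfl
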